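-- pv_equiv track=rewrite | github.com/ara818/django-autocompleter | autocompleter/utils.py | term_phrase_already_aliased
-- ===== SOURCE A (Python) =====
-- def term_phrase_already_aliased(
--     aliasable_phrase_start, aliasable_phrase_end, aliased_phrase_ranges
-- ):
--     """
--     For the phrase range (start/end word index) that we want to alias, tell us if
--     some part of the phrase has already been aliased.
--     """
--     for aliased_phrase_range in aliased_phrase_ranges:
--         (
--             aliased_phrase_start,
--             aliased_phrase_end,
--         ) = aliased_phrase_range
--         if aliasable_phrase_start >= aliased_phrase_start:
--             return True
--         elif aliasable_phrase_end <= aliased_phrase_end: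
--             return True
--     return False
-- ===== SOURCE B (Python) =====
-- def term_phrase_already_aliased(
--     aliasable_phrase_start, aliasable_phrase_end, aliased_phrase_ranges
-- ):
--     ranges = list(aliased_phrase_ranges)
--     if not ranges:
--         return False
--     min_start = min(r[0] for r in ranges)
--     max_end = max(r[1] for r in ranges)
--     return aliasable_phrase_start >= min_start or aliasable_phrase_end <= max_end
-- ===== Notes on version B (the rewrite author's own statement) =====
-- stated objective: alternative
-- what changed: Replaces the short-circuit per-range scan with an aggregate-then-compare: take the minimum start and maximum end over all ranges and test the phrase bounds once against those two aggregates.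
import Mathlib
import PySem

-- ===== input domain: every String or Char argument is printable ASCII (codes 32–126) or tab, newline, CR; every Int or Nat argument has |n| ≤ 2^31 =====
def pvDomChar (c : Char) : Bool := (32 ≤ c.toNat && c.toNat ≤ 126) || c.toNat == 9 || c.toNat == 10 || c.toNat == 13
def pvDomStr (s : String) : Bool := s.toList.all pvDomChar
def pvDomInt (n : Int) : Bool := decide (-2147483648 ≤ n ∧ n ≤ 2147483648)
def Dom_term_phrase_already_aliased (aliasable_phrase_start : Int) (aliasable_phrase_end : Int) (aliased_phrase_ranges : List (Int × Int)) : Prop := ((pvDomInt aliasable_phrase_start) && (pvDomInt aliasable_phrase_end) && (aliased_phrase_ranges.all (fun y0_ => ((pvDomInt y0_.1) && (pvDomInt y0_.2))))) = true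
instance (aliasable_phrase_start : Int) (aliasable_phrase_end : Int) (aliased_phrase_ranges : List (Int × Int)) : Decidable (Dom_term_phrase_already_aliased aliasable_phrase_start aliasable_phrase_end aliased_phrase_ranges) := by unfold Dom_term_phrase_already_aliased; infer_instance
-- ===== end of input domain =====

-- B replaces A's short-circuit per-range scan by an aggregate-then-compare (min of starts, max of ends, one comparison each); objective: alternative decomposition, same O(n) cost.


-- ===== PORT A =====
-- Port of A: short-circuit scan over the ranges, branch order as in the Python.
def term_phrase_already_aliased (aliasable_phrase_start : Int) (aliasable_phrase_end : Int) (aliased_phrase_ranges : List (Int × Int)) : Bool :=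
  match aliased_phrase_ranges with
  | [] => false
  | (aliased_phrase_start, aliased_phrase_end) :: rest =>
    if aliasable_phrase_start ≥ aliased_phrase_start then true
    else if aliasable_phrase_end ≤ aliased_phrase_end then true
    else term_phrase_already_aliased aliasable_phrase_start aliasable_phrase_end rest

-- ===== PORT B =====
-- B: aggregate-then-compare (see Source B): min of starts and max of ends, one comparison each.
def term_phrase_already_aliased_alt (aliasable_phrase_start : Int) (aliasable_phrase_end : Int) (aliased_phrase_ranges : List (Int × Int)) : Bool :=
  match aliased_phrase_ranges with
  | [] => false
  | (s0, e0) :: rest =>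
    let min_start := rest.foldl (fun acc p => min acc p.1) s0
    let max_end := rest.foldl (fun acc p => max acc p.2) e0
    decide (aliasable_phrase_start ≥ min_start) || decide (aliasable_phrase_end ≤ max_end)

-- ===== PRECONDITION & SPEC =====
def Spec_term_phrase_already_aliased (aliasable_phrase_start : Int) (aliasable_phrase_end : Int) (aliased_phrase_ranges : List (Int × Int)) (out : Bool) : Prop := out = term_phrase_already_aliased_alt aliasable_phrase_start aliasable_phrase_end aliased_phrase_ranges
instance (aliasable_phrase_start : Int) (aliasable_phrase_end : Int) (aliased_phrase_ranges : List (Int × Int)) (out : Bool) : Decidable (Spec_term_phrase_already_aliased aliasable_phrase_start aliasable_phrase_end aliased_phrase_ranges out) := by unfold Spec_term_phrase_already_aliased; infer_instance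

-- ===== CLAIM (what is proved, stated in full; the proofs are below) =====
def Claim_equal_term_phrase_already_aliased : Prop := ∀ (aliasable_phrase_start : Int) (aliasable_phrase_end : Int) (aliased_phrase_ranges : List (Int × Int)), Dom_term_phrase_already_aliased aliasable_phrase_start aliasable_phrase_end aliased_phrase_ranges → Spec_term_phrase_already_aliased aliasable_phrase_start aliasable_phrase_end aliased_phrase_ranges (term_phrase_already_aliased aliasable_phrase_start aliasable_phrase_end aliased_phrase_ranges)

-- ===== LEMMAS AND PROOFS =====
lemma tpaa_key (s e : Int) : ∀ (t : List (Int × Int)) (a b : Int),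
    (t.foldl (fun acc p => min acc p.1) a ≤ s ∨ e ≤ t.foldl (fun acc p => max acc p.2) b)
      ↔ (a ≤ s ∨ e ≤ b ∨ term_phrase_already_aliased s e t = true) := by
  intro t
  induction t with
  | nil => intro a b; simp [term_phrase_already_aliased]
  | cons hd tl ih =>
    intro a b
    obtain ⟨c, d⟩ := hd
    simp only [List.foldl_cons]
    rw [ih (min a c) (max b d)]
    simp only [term_phrase_already_aliased, min_le_iff, le_max_iff, ge_iff_le]
    split_ifs <;> cases hA : term_phrase_already_aliased s e tl <;> simp_all <;> try omega

-- ===== VERDICT (by name: the statement is the Claim_ definition above) =====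
theorem term_phrase_already_aliased_spec : Claim_equal_term_phrase_already_aliased := by
  intro s e l _
  unfold Spec_term_phrase_already_aliased term_phrase_already_aliased_alt
  match l with
  | [] => rfl
  | (s0, e0) :: rest =>
    apply Bool.coe_iff_coe.mp
    simp only [ge_iff_le, Bool.or_eq_true, decide_eq_true_iff]
    rw [tpaa_key s e rest s0 e0]
    simp only [term_phrase_already_aliased, ge_iff_le]
    split_ifs <;> cases hA : term_phrase_already_aliased s e rest <;> simp_all
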